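-- pv_equiv track=rewrite | github.com/pypi-data/pypi-mirror-374 | packages/logillm/logillm-0.2.15-py3-none-any.whl/logillm/optimizers/proposers/grounded.py | _analyze_demonstrations
-- ===== SOURCE A (Python) =====
-- from typing import Any
--
-- def _analyze_demonstrations(demonstrations: list[dict[str, Any]]) -> dict[str, Any]:
--     """Analyze patterns in demonstrations."""
--     if not demonstrations:
--         return {
--             "reasoning_pattern": "none",
--             "output_format": "none",
--             "insights": "none",
--         }
--
--     patterns = {
--         "reasoning_pattern": "step-by-step",
--         "output_format": "structured",
--         "insights": [],
--     }
--
--     # Look for common patterns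
--     for demo in demonstrations[:5]:  # Analyze first 5
--         if "reasoning" in demo.get("outputs", {}):
--             if "step" in str(demo["outputs"]["reasoning"]).lower():
--                 patterns["reasoning_pattern"] = "step-by-step reasoning"
--
--         if "outputs" in demo:
--             if isinstance(demo["outputs"], dict):
--                 patterns["output_format"] = f"Dict with keys: {list(demo['outputs'].keys())}"
--
--     # Extract insights
--     patterns["insights"] = "Successful examples show clear reasoning and structured outputs"
--
--     return patterns
-- ===== SOURCE B (Python) =====
-- def _analyze_demonstrations(demonstrations):
--     """Analyze patterns in demonstrations, via a recursive scan of the first 5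
--     that combines results on the way back up instead of a mutating loop."""
--     if not demonstrations:
--         return {
--             "reasoning_pattern": "none",
--             "output_format": "none",
--             "insights": "none",
--         }
--
--     has_step, keys = _scan(demonstrations, 5)
--     return {
--         "reasoning_pattern": "step-by-step reasoning" if has_step else "step-by-step",
--         "output_format": f"Dict with keys: {keys}" if keys is not None else "structured",
--         "insights": "Successful examples show clear reasoning and structured outputs",
--     }
--
--
-- def _scan(demos, k):
--     """Recursively scan up to k demos; return (any demo shows step reasoning,
--     the key list of the LAST demo with a dict 'outputs', or None)."""
--     if not demos or k == 0:
--         return (False, None)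
--     has_step_rest, keys_rest = _scan(demos[1:], k - 1)
--     d = demos[0]
--     outs = d.get("outputs", {})
--     has_step_here = "reasoning" in outs and "step" in str(outs["reasoning"]).lower()
--     keys_here = list(d["outputs"].keys()) if "outputs" in d and isinstance(d["outputs"], dict) else None
--     return (has_step_here or has_step_rest, keys_rest if keys_rest is not None else keys_here)
-- ===== Notes on version B (the rewrite author's own statement) =====
-- stated objective: alternative
-- what changed: A threads a mutable patterns dict through an iterative overwrite loop over the first-5 slice; B is recursive: a helper recurses down the list with a counter and combines on the way back up (or for the step flag, keep-the-later key list for the format), assembling the result dict once at the end.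
import Mathlib
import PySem

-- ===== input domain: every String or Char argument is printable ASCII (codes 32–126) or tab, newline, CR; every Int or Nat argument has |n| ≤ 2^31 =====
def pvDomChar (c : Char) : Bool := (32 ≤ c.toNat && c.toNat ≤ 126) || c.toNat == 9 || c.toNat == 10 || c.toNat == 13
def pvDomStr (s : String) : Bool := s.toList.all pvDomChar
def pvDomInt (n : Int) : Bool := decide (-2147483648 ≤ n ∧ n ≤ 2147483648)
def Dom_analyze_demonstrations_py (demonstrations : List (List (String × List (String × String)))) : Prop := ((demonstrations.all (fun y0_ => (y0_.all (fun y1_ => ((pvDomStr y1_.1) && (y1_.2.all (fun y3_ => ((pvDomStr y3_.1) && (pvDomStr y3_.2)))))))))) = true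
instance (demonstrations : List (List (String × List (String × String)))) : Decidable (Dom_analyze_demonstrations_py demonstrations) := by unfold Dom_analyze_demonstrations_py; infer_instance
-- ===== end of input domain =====

-- B replaces A's mutating loop by a recursive scan that combines results on the way back up; objective: alternative (same cost).

-- Shared primitive: Python's repr of an ASCII str (quote choice + escapes), used by the
-- f"Dict with keys: {...}" both sources contain.  Exact on the printable-ASCII+tab/nl/cr domain.
def pyReprChar (q : Char) (c : Char) : List Char :=
  if c = '\\' then ['\\', '\\']
  else if c = q then ['\\', q]
  else if c = Char.ofNat 9 then ['\\', 't']
  else if c = Char.ofNat 10 then ['\\', 'n']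
  else if c = Char.ofNat 13 then ['\\', 'r']
  else [c]

def pyReprStr (s : String) : String :=
  let cs := s.toList
  let q : Char := if cs.contains '\'' && !(cs.contains '"') then '"' else '\''
  String.ofList (q :: (cs.flatMap (pyReprChar q) ++ [q]))

-- Python's str(list_of_strings): '[' ++ ', '.join(repr each) ++ ']'
def pyReprStrList (xs : List String) : String :=
  "[" ++ String.intercalate ", " (xs.map pyReprStr) ++ "]"

-- ===== PORT A =====
-- the body of A's 'for demo in demonstrations[:5]' loop, threading patterns = (reasoning_pattern, output_format)
def stepA (p : String × String) (demo : List (String × List (String × String))) : String × String :=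
  let d := PySem.Dict.ofList demo
  let outs := PySem.Dict.ofList (d.getD "outputs" [])
  let rp := if outs.contains "reasoning" then
              (if PySem.Str.isIn "step" (PySem.Str.lower (outs.getD "reasoning" "")) then
                "step-by-step reasoning" else p.1)
            else p.1
  -- 'if "outputs" in demo': isinstance(demo["outputs"], dict) is always true under the type convention
  let fo := if d.contains "outputs" then
              "Dict with keys: " ++ pyReprStrList outs.keys
            else p.2
  (rp, fo)

def analyze_demonstrations_py (demonstrations : List (List (String × List (String × String)))) : List (String × String) :=
  if demonstrations = [] then
    [("reasoning_pattern", "none"), ("output_format", "none"), ("insights", "none")]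
  else
    let st := (PySem.List.slice demonstrations none (some 5)).foldl stepA ("step-by-step", "structured")
    [("reasoning_pattern", st.1), ("output_format", st.2),
     ("insights", "Successful examples show clear reasoning and structured outputs")]

-- ===== PORT B =====
-- _scan: recurse down with the counter, combine on the way back up
def scanB : List (List (String × List (String × String))) → Nat → Bool × Option (List String)
  | [], _ => (false, none)
  | _ :: _, 0 => (false, none)
  | d :: rest, k + 1 =>
    let r := scanB rest k
    let dd := PySem.Dict.ofList d
    let outs := PySem.Dict.ofList (dd.getD "outputs" [])
    let hasStepHere := outs.contains "reasoning" &&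
      PySem.Str.isIn "step" (PySem.Str.lower (outs.getD "reasoning" ""))
    let keysHere := if dd.contains "outputs" then some outs.keys else none
    (hasStepHere || r.1, match r.2 with | some x => some x | none => keysHere)

def analyze_demonstrations_py_alt (demonstrations : List (List (String × List (String × String)))) : List (String × String) :=
  if demonstrations = [] then
    [("reasoning_pattern", "none"), ("output_format", "none"), ("insights", "none")]
  else
    let r := scanB demonstrations 5
    [("reasoning_pattern", if r.1 then "step-by-step reasoning" else "step-by-step"),
     ("output_format", match r.2 with
                       | some ks => "Dict with keys: " ++ pyReprStrList ks
                       | none => "structured"),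
     ("insights", "Successful examples show clear reasoning and structured outputs")]

-- ===== PRECONDITION & SPEC =====
def Spec_analyze_demonstrations_py (demonstrations : List (List (String × List (String × String)))) (out : List (String × String)) : Prop := out = analyze_demonstrations_py_alt demonstrations
instance (demonstrations : List (List (String × List (String × String)))) (out : List (String × String)) : Decidable (Spec_analyze_demonstrations_py demonstrations out) := by unfold Spec_analyze_demonstrations_py; infer_instance

-- ===== CLAIM (what is proved, stated in full; the proofs are below) =====
def Claim_equal_analyze_demonstrations_py : Prop := ∀ (demonstrations : List (List (String × List (String × String)))), Dom_analyze_demonstrations_py demonstrations → Spec_analyze_demonstrations_py demonstrations (analyze_demonstrations_py demonstrations)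

-- ===== LEMMAS AND PROOFS =====

-- B-side predicates as functions, to state the fold/scan characterisations
def hasStepP (demo : List (String × List (String × String))) : Bool :=
  let outs := PySem.Dict.ofList ((PySem.Dict.ofList demo).getD "outputs" [])
  outs.contains "reasoning" && PySem.Str.isIn "step" (PySem.Str.lower (outs.getD "reasoning" ""))

def hasOutsP (demo : List (String × List (String × String))) : Bool :=
  (PySem.Dict.ofList demo).contains "outputs"

def keysOf (demo : List (String × List (String × String))) : List String :=
  (PySem.Dict.ofList ((PySem.Dict.ofList demo).getD "outputs" [])).keys

-- A's loop body, expressed through the predicates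
theorem stepA_eq (p : String × String) (d : List (String × List (String × String))) :
    stepA p d = ((if hasStepP d then "step-by-step reasoning" else p.1),
                 (if hasOutsP d then "Dict with keys: " ++ pyReprStrList (keysOf d) else p.2)) := by
  simp only [stepA, hasStepP, hasOutsP, keysOf]
  by_cases h1 : (PySem.Dict.ofList ((PySem.Dict.ofList d).getD "outputs" [])).contains "reasoning" <;>
    simp [h1]

-- splitting the pair-state fold into two independent folds
theorem foldl_pair {α : Type} (l : List α) (f g : α → String → String) (a b : String) :
    l.foldl (fun p d => (f d p.1, g d p.2)) (a, b) =
      (l.foldl (fun x d => f d x) a, l.foldl (fun y d => g d y) b) := by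
  induction l generalizing a b with
  | nil => rfl
  | cons hd tl ih => simp [List.foldl, ih]

-- 'set once, keep forever' fold = any
theorem foldl_flag {α : Type} (l : List α) (c : α → Bool) (C : String) (a : String) :
    l.foldl (fun x d => if c d then C else x) a = if l.any c then C else a := by
  induction l generalizing a with
  | nil => rfl
  | cons hd tl ih =>
    simp only [List.foldl, List.any_cons]
    rw [ih]
    by_cases h : c hd = true <;> simp [h]

-- 'overwrite each time' fold = last match
theorem foldl_last {α : Type} (l : List α) (c : α → Bool) (g : α → String) (b : String) :
    l.foldl (fun y d => if c d then g d else y) b =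
      (match l.reverse.find? c with | some d => g d | none => b) := by
  induction l generalizing b with
  | nil => rfl
  | cons hd tl ih =>
    simp only [List.foldl, List.reverse_cons, List.find?_append]
    rw [ih]
    cases htl : tl.reverse.find? c with
    | some d => simp
    | none => cases h : c hd <;> simp [List.find?, h]

-- characterisation of B's recursive scan on take k
theorem scanB_spec (l : List (List (String × List (String × String)))) (k : Nat) :
    scanB l k = ((l.take k).any hasStepP,
                 ((l.take k).reverse.find? hasOutsP).map keysOf) := by
  induction l generalizing k with
  | nil => cases k <;> rfl
  | cons d rest ih =>
    cases k with
    | zero => rfl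
    | succ k =>
      simp only [scanB, ih, List.take_succ_cons, List.any_cons, List.reverse_cons,
        List.find?_append, hasStepP]
      cases htl : (rest.take k).reverse.find? hasOutsP with
      | some x => simp
      | none =>
        by_cases h : (PySem.Dict.ofList d).contains "outputs" <;>
          simp [List.find?, h, hasOutsP, keysOf]

-- ===== VERDICT (by name: the statement is the Claim_ definition above) =====
theorem analyze_demonstrations_py_spec : Claim_equal_analyze_demonstrations_py := by
  intro demos _
  unfold Spec_analyze_demonstrations_py analyze_demonstrations_py analyze_demonstrations_py_alt
  by_cases h : demos = []
  · simp [h]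
  · simp only [h, if_false]
    have hs : stepA = (fun (p : String × String) d =>
        ((fun d x => if hasStepP d then "step-by-step reasoning" else x) d p.1,
         (fun d y => if hasOutsP d then "Dict with keys: " ++ pyReprStrList (keysOf d) else y) d p.2)) := by
      funext p d; exact stepA_eq p d
    rw [hs, foldl_pair, foldl_flag, foldl_last, scanB_spec]
    have h5 : PySem.List.slice demos none (some 5) = demos.take 5 := by
      have := PySem.List.slice_to_natCast demos 5
      simpa using this
    rw [h5]
    cases hf : (demos.take 5).reverse.find? hasOutsP <;> simp
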